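-- pv_equiv track=rewrite | github.com/mridubhatnagar/HackerRank | 63-gemstones.py | gemstones
-- ===== SOURCE A (Python) =====
-- def gemstones(arr):
--     D={}
--     gemstone = []
--     s = ''.join(arr)
--     s=''.join(list(set(s)))
--     for character in s:
--         for word in enumerate(arr):
--             position=word[0]
--             value=word[1]
--             if character in value:
--                 if character not in D:
--                     D[character] = [position]
--                 else:
--                     D[character].append(position)
--     for character in D:
--         if len(D[character]) == len(arr):
--             gemstone.append(character)
--     return len(gemstone)
-- ===== SOURCE B (Python) =====
-- def gemstones(arr):
--     counts = {}
--     for word in arr: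
--         for ch in set(word):
--             counts[ch] = counts.get(ch, 0) + 1
--     n = len(arr)
--     return sum(1 for v in counts.values() if v == n)
-- ===== Notes on version B (the rewrite author's own statement) =====
-- stated objective: simpler
-- what changed: Replaces A's char-outer scan (for each distinct char of the joined string, a substring test against every word building a dict of word-position lists) by one word-outer pass that increments a per-character count over each word's distinct characters, returning how many counts equal len(arr).
import Mathlib
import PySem

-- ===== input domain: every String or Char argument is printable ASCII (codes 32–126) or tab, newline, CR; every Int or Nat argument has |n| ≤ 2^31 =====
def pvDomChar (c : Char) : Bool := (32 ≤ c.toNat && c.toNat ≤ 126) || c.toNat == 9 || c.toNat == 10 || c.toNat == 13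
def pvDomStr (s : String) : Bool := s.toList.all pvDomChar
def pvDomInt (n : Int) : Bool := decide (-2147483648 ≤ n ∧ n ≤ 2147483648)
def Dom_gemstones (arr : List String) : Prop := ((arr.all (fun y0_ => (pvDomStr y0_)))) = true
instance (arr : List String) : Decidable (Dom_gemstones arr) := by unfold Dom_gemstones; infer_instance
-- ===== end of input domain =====

-- B replaces A's char-outer scan (substring tests building a dict of word-position lists)
-- by one word-outer pass keeping a count per distinct character; objective: simpler.

-- ===== PORT A =====
-- ''.join(list(set(s))) iterates the set in Python's hash order, which is not modelled;
-- the returned COUNT does not depend on that order, so the set is kept as a PySem.Set.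
def gemstones (arr : List String) : Int :=
  let s : PySem.Set Char := PySem.Set.ofList (PySem.Chars.join [] (arr.map String.toList))
  let D := s.foldl (fun D character =>
    (PySem.List.enumerate arr).foldl (fun D word =>
      let position := word.1
      let value := word.2
      -- 'character in value' with a single character: exact char membership
      if value.toList.contains character then
        if !D.contains character then
          D.insert character [position]
        else
          D.insert character (D.getD character [] ++ [position])  -- D[character].append(position)
      else D) D) (PySem.Dict.empty : PySem.Dict Char (List Int))
  let gemstone := D.items.foldl (fun g kv =>
    if kv.2.length = arr.length then g ++ [kv.1] else g) ([] : List Char)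
  (gemstone.length : Int)

-- ===== PORT B =====
def gemstones_alt (arr : List String) : Int :=
  let counts := arr.foldl (fun counts word =>
    (PySem.Set.ofList word.toList).foldl (fun counts ch =>
      counts.insert ch (counts.getD ch 0 + 1)) counts) (PySem.Dict.empty : PySem.Dict Char Int)
  let n : Int := (arr.length : Int)
  counts.values.foldl (fun acc v => if v = n then acc + 1 else acc) 0

-- ===== PRECONDITION & SPEC =====
def Spec_gemstones (arr : List String) (out : Int) : Prop := out = gemstones_alt arr
instance (arr : List String) (out : Int) : Decidable (Spec_gemstones arr out) := by unfold Spec_gemstones; infer_instance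

-- ===== CLAIM (what is proved, stated in full; the proofs are below) =====
def Claim_equal_gemstones : Prop := ∀ (arr : List String), Dom_gemstones arr → Spec_gemstones arr (gemstones arr)

-- ===== LEMMAS AND PROOFS =====

-- ''.join(arr) (empty separator) concatenates the char lists
theorem join_nil_sep (parts : List (List Char)) : PySem.Chars.join [] parts = parts.flatten := by
  induction parts with
  | nil => simp [PySem.Chars.join_nil]
  | cons p t ih =>
    cases t with
    | nil => simp [PySem.Chars.join_singleton]
    | cons q r => rw [PySem.Chars.join_cons_cons]; simp at ih ⊢; exact ih

-- the value A's dict holds at key c: indices of the words containing c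
def posOf (arr : List String) (c : Char) : List Int :=
  (((PySem.List.enumerate arr).filter (fun pw => pw.2.toList.contains c)).map (·.1))

-- folding 'insert c (getD ++ [pos])' over the matching words collapses to one insert
theorem inner_filtered (c : Char) (ps : List (Int × String)) (D : PySem.Dict Char (List Int)) :
    ps.foldl (fun D pw => D.insert c (D.getD c [] ++ [pw.1])) D
      = (if ps = [] then D else D.insert c (D.getD c [] ++ ps.map (·.1))) := by
  induction ps generalizing D with
  | nil => simp
  | cons p t ih =>
    simp only [List.foldl_cons, ih, reduceCtorEq, if_false]
    cases t with
    | nil => simp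
    | cons q r =>
      simp only [reduceCtorEq, if_false, PySem.Dict.getD_insert_self,
        PySem.Dict.insert_insert_self, List.map_cons]
      simp

-- A's inner loop, for a key c not yet in D that some word contains, is one insert
theorem inner_loop (arr : List String) (c : Char) (D : PySem.Dict Char (List Int))
    (hc : D.contains c = false) (hne : posOf arr c ≠ []) :
    (PySem.List.enumerate arr).foldl (fun D word =>
      if word.2.toList.contains c then
        if !D.contains c then D.insert c [word.1]
        else D.insert c (D.getD c [] ++ [word.1])
      else D) D = D.insert c (posOf arr c) := by
  rw [PySem.List.foldl_congr_mem (PySem.List.enumerate arr)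
    (g := fun D pw => if pw.2.toList.contains c then D.insert c (D.getD c [] ++ [pw.1]) else D)
    _ D ?h]
  case h =>
    intro D pw _
    cases h : pw.2.toList.contains c with
    | false => simp only [h, Bool.false_eq_true, if_false]
    | true =>
      simp only [h, if_true]
      cases hcon : D.contains c with
      | true => simp only [Bool.not_true, Bool.false_eq_true, if_false]
      | false =>
        simp only [Bool.not_false, if_true,
          PySem.Dict.getD_of_not_contains D _ hcon, List.nil_append]
  rw [PySem.List.foldl_if_eq_foldl_filter, inner_filtered]
  have h2 : (PySem.List.enumerate arr).filter (fun pw => pw.2.toList.contains c) ≠ [] := by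
    intro h; exact hne (by simp only [posOf, h, List.map_nil])
  rw [if_neg h2, PySem.Dict.getD_of_not_contains D _ hc]
  simp [posOf]

-- A's outer loop over fresh distinct characters appends (c, posOf arr c) items
theorem outer_loop (arr : List String) (s : List Char) (D : PySem.Dict Char (List Int))
    (hnd : s.Nodup) (hfresh : ∀ c ∈ s, D.contains c = false)
    (hpos : ∀ c ∈ s, posOf arr c ≠ []) :
    (s.foldl (fun D character =>
      (PySem.List.enumerate arr).foldl (fun D word =>
        if word.2.toList.contains character then
          if !D.contains character then D.insert character [word.1]
          else D.insert character (D.getD character [] ++ [word.1])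
        else D) D) D).items = D.items ++ s.map (fun c => (c, posOf arr c)) := by
  induction s generalizing D with
  | nil => simp
  | cons c t ih =>
    simp only [List.foldl_cons, List.map_cons]
    rw [inner_loop arr c D (hfresh c (by simp)) (hpos c (by simp))]
    rw [ih (D.insert c (posOf arr c)) (List.nodup_cons.mp hnd).2 ?fresh
      (fun x hx => hpos x (List.mem_cons_of_mem _ hx))]
    · rw [PySem.Dict.items_insert_of_not_contains D _ (hfresh c (by simp))]
      simp
    case fresh =>
      intro x hx
      rw [PySem.Dict.contains_insert]
      have hxc : x ≠ c := by
        rintro rfl; exact (List.nodup_cons.mp hnd).1 hx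
      simp [hxc, hfresh x (List.mem_cons_of_mem _ hx)]

theorem posOf_length (arr : List String) (c : Char) :
    (posOf arr c).length = arr.countP (fun w => w.toList.contains c) := by
  have : arr.countP (fun w => w.toList.contains c)
      = ((PySem.List.enumerate arr).map (·.2)).countP (fun w => w.toList.contains c) := by
    rw [PySem.List.map_snd_enumerate]
  rw [this, List.countP_map, posOf, List.length_map, ← List.countP_eq_length_filter]
  rfl

-- counting c across the per-word distinct-char lists counts the words containing c
theorem count_flatMap_sets (arr : List String) (c : Char) :
    (arr.flatMap (fun w => PySem.Set.ofList w.toList)).count c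
      = arr.countP (fun w => w.toList.contains c) := by
  induction arr with
  | nil => simp
  | cons w t ih =>
    rw [List.flatMap_cons, List.count_append, ih, List.countP_cons]
    by_cases h : c ∈ w.toList
    · have hm : c ∈ PySem.Set.ofList w.toList := (PySem.Set.mem_ofList _ _).mpr h
      rw [List.count_eq_one_of_mem (PySem.Set.nodup_ofList _) hm]
      simp [h]; omega
    · have hm : c ∉ PySem.Set.ofList w.toList := fun hc => h ((PySem.Set.mem_ofList _ _).mp hc)
      rw [List.count_eq_zero_of_not_mem hm]
      simp [h]

-- A counts the distinct characters of the joined string contained in every word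
theorem gemstones_eq (arr : List String) :
    gemstones arr = ((PySem.Set.ofList (arr.flatMap String.toList)).countP
      (fun c => arr.countP (fun w => w.toList.contains c) = arr.length) : Int) := by
  unfold gemstones
  simp only [join_nil_sep, ← List.flatMap_def]
  set s := PySem.Set.ofList (arr.flatMap String.toList) with hs
  rw [outer_loop arr s PySem.Dict.empty (PySem.Set.nodup_ofList _)
    (fun c _ => PySem.Dict.contains_empty c) ?pos]
  case pos =>
    intro c hc
    have : c ∈ arr.flatMap String.toList := (PySem.Set.mem_ofList _ _).mp hc
    obtain ⟨w, hw, hcw⟩ := List.mem_flatMap.mp this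
    intro h
    have : ((PySem.List.enumerate arr).filter (fun pw => pw.2.toList.contains c)) = [] := by
      have := congrArg List.length h
      simp only [posOf, List.length_map, List.length_nil] at this
      exact List.eq_nil_of_length_eq_zero this
    rw [List.filter_eq_nil_iff] at this
    have hw2 : w ∈ (PySem.List.enumerate arr).map (·.2) := by
      rw [PySem.List.map_snd_enumerate]; exact hw
    obtain ⟨pw, hpw, rfl⟩ := List.mem_map.mp hw2
    exact absurd (by simpa using hcw) (by simpa using this pw hpw)
  have hempty : (PySem.Dict.empty : PySem.Dict Char (List Int)).items = [] := rfl
  rw [hempty]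
  have happ := PySem.List.foldl_append_ite (fun kv : Char × List Int => kv.2.length = arr.length)
    (fun kv => kv.1) ([] ++ List.map (fun c => (c, posOf arr c)) s) []
  rw [happ]
  simp only [List.nil_append, List.length_map, List.filter_map, List.length_map]
  rw [← List.countP_eq_length_filter]
  congr 1
  apply List.countP_congr
  intro c hc
  simp [posOf_length]

-- B counts the distinct characters of the flattened per-word char sets whose count is len(arr)
theorem gemstones_alt_eq (arr : List String) :
    gemstones_alt arr = ((PySem.Set.ofList (arr.flatMap (fun w => PySem.Set.ofList w.toList))).countP
      (fun c => arr.countP (fun w => w.toList.contains c) = arr.length) : Int) := by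
  unfold gemstones_alt
  have hflat : arr.foldl (fun counts word =>
      (PySem.Set.ofList word.toList).foldl (fun counts ch =>
        counts.insert ch (counts.getD ch 0 + 1)) counts) (PySem.Dict.empty : PySem.Dict Char Int)
      = (arr.flatMap (fun w => PySem.Set.ofList w.toList)).foldl
          (fun d x => d.insert x (d.getD x 0 + 1)) PySem.Dict.empty := by
    rw [List.flatMap_def, List.foldl_flatten, List.foldl_map]
  rw [hflat, PySem.Dict.foldl_insert_getD_add_one_eq_counter]
  set L := arr.flatMap (fun w => PySem.Set.ofList w.toList) with hL
  rw [PySem.List.foldl_ite_add_one (fun v => v = (arr.length : Int))]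
  have hvals : (PySem.Dict.counter L).values = (PySem.Set.ofList L).map (fun k => ((L.count k : Nat) : Int)) := by
    show (PySem.Dict.counter L).items.map (·.2) = _
    rw [PySem.Dict.items_counter, List.map_map]
    rfl
  rw [hvals, List.countP_map, zero_add]
  congr 1
  apply List.countP_congr
  intro c hc
  simp only [Function.comp_apply, Int.natCast_inj]
  rw [count_flatMap_sets]

-- ===== VERDICT (by name: the statement is the Claim_ definition above) =====
theorem gemstones_spec : Claim_equal_gemstones := by
  intro arr _
  unfold Spec_gemstones
  rw [gemstones_eq, gemstones_alt_eq]
  congr 1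
  apply (List.perm_ext_iff_of_nodup (PySem.Set.nodup_ofList _) (PySem.Set.nodup_ofList _) |>.mpr ?_).countP_eq
  intro c
  rw [PySem.Set.mem_ofList, PySem.Set.mem_ofList]
  simp only [List.mem_flatMap]
  constructor
  · rintro ⟨w, hw, hc⟩; exact ⟨w, hw, (PySem.Set.mem_ofList _ _).mpr hc⟩
  · rintro ⟨w, hw, hc⟩; exact ⟨w, hw, (PySem.Set.mem_ofList _ _).mp hc⟩
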